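-- pv_equiv track=rewrite | github.com/Rfam/rfam-seed-qc | scripts/fixable_errors.py | _find_duplicates_block_aware
-- ===== SOURCE A (Python) =====
-- def parse_sequence_identifier(seq_name):
--     """
--     Parse sequence identifier to extract accession and coordinates.
--
--     Format: ACCESSION/START-END (e.g., AF228364.1/1-74)
--
--     Args:
--         seq_name: Sequence identifier string
--
--     Returns:
--         tuple: (accession, coordinates) or (seq_name, None) if no coordinates found
--     """
--     if '/' in seq_name:
--         parts = seq_name.split('/', 1)
--         return parts[0], parts[1]
--     return seq_name, None
--
-- def _find_duplicates_block_aware(sequence_entries, raw_entries):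
--     """
--     Detect true duplicates: same (accession, coords, data) appearing multiple
--     times within the SAME block. Repeated names across different blocks are
--     interleaved format, not duplicates.
--     """
--     from collections import defaultdict
--
--     # For each block, track (accession, coords, seq_data) keys
--     per_block_seen = defaultdict(lambda: defaultdict(int))
--     duplicate_names = set()
--
--     for seq_name, seq_data, block_idx in raw_entries:
--         accession, coords = parse_sequence_identifier(seq_name)
--         key = (accession, coords, seq_data)
--         per_block_seen[block_idx][key] += 1
--         if per_block_seen[block_idx][key] > 1:
--             duplicate_names.add(seq_name)
--
--     # Build unique_sequences from merged entries
--     unique_sequences = {}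
--     duplicate_indices = []
--
--     for idx, (seq_name, seq_data) in enumerate(sequence_entries):
--         unique_sequences[seq_name] = seq_data
--         if seq_name in duplicate_names:
--             duplicate_indices.append(idx)
--
--     return unique_sequences, duplicate_indices
-- ===== SOURCE B (Python) =====
-- def parse_sequence_identifier(seq_name):
--     if '/' in seq_name:
--         parts = seq_name.split('/', 1)
--         return parts[0], parts[1]
--     return seq_name, None
--
-- def _find_duplicates_block_aware(sequence_entries, raw_entries):
--     # No frequency table at all: an entry is a duplicate iff an identical
--     # (parsed name, data, block) entry exists SOMEWHERE ELSE in the list.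
--     # Direct pairwise search over all other entries for each entry.
--     def key(name, data, blk):
--         return (parse_sequence_identifier(name), data, blk)
--
--     duplicate_names = set()
--     for i, (name, data, blk) in enumerate(raw_entries):
--         k = key(name, data, blk)
--         others = raw_entries[:i] + raw_entries[i + 1:]
--         if any(key(n2, d2, b2) == k for n2, d2, b2 in others):
--             duplicate_names.add(name)
--
--     unique_sequences = dict(sequence_entries)
--     duplicate_indices = [i for i, (name, _) in enumerate(sequence_entries)
--                          if name in duplicate_names]
--     return unique_sequences, duplicate_indices
-- ===== Notes on version B (the rewrite author's own statement) =====
-- stated objective: alternative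
-- what changed: A builds a nested per-block frequency dict and flags a name the moment its key's running count exceeds 1, then fills the output dict and index list in one interleaved loop; B keeps no counting structure at all - for each raw entry it searches the rest of the list (raw[:i]+raw[i+1:]) for an identical (parsed-name, data, block) key and flags on any hit, then builds the output via dict(sequence_entries) and a list comprehension.
import Mathlib
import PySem

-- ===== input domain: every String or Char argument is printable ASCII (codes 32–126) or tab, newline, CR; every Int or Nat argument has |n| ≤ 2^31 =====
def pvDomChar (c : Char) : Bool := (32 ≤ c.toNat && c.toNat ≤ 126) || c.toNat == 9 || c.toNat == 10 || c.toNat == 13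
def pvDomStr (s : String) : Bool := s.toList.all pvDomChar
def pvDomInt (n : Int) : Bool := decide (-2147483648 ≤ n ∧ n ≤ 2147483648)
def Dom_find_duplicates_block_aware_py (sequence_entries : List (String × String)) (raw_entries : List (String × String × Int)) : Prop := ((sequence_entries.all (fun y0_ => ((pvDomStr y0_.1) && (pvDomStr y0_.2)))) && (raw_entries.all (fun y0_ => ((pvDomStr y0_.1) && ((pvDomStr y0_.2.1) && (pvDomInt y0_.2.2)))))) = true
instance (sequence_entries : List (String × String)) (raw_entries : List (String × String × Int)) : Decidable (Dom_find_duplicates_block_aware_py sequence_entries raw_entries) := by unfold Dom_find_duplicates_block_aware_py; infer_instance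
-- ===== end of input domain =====

-- B replaces A's nested per-block frequency dict by a direct pairwise search (each entry is flagged
-- iff an identical key occurs elsewhere in the list); objective: alternative algorithm, not speed.


-- ===== PORT A =====
-- shared module helper: parse_sequence_identifier (used by both Python versions)
def parse_sequence_identifier_port (seq_name : String) : String × Option String :=
  if PySem.Str.isIn "/" seq_name then
    let parts := (PySem.Str.splitMax? seq_name "/" 1).getD []   -- sep = "/" ≠ "", so splitMax? is `some`
    (((PySem.List.pyGet? parts 0).getD ""), some ((PySem.List.pyGet? parts 1).getD ""))
  else (seq_name, none)

-- loop body of A's first pass (per_block_seen update + duplicate_names check)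
def pvStepA (st : PySem.Dict Int (PySem.Dict (String × Option String × String) Int) × PySem.Set String)
    (e : String × String × Int) :
    PySem.Dict Int (PySem.Dict (String × Option String × String) Int) × PySem.Set String :=
  let pc := parse_sequence_identifier_port e.1
  let key : String × Option String × String := (pc.1, pc.2, e.2.1)
  let inner := st.1.getD e.2.2 PySem.Dict.empty
  let c := inner.getD key 0 + 1
  (st.1.insert e.2.2 (inner.insert key c), if c > 1 then PySem.Set.add st.2 e.1 else st.2)

-- loop body of A's second pass (unique_sequences insert + duplicate_indices append)
def pvStepOut (dup : PySem.Set String) (acc : PySem.Dict String String × List Int)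
    (p : Int × (String × String)) : PySem.Dict String String × List Int :=
  (acc.1.insert p.2.1 p.2.2, if PySem.Set.contains dup p.2.1 then acc.2 ++ [p.1] else acc.2)

def find_duplicates_block_aware_py (sequence_entries : List (String × String)) (raw_entries : List (String × String × Int)) : (List (String × String)) × List Int :=
  let st := raw_entries.foldl pvStepA (PySem.Dict.empty, PySem.Set.empty)
  let fin := (PySem.List.enumerate sequence_entries 0).foldl (pvStepOut st.2) (PySem.Dict.empty, [])
  (fin.1.items, fin.2)

-- ===== PORT B =====
-- B's key helper: key(name, data, blk) = (parse_sequence_identifier(name), data, blk)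
def pvKeyB (e : String × String × Int) : (String × Option String) × String × Int :=
  (parse_sequence_identifier_port e.1, e.2.1, e.2.2)

-- B's loop body: pairwise search for the entry's key among ALL OTHER entries (raw[:i] + raw[i+1:])
def pvStepB (raw_entries : List (String × String × Int)) (dup : PySem.Set String)
    (p : Int × (String × String × Int)) : PySem.Set String :=
  let k := pvKeyB p.2
  let others := PySem.List.slice raw_entries none (some p.1) ++
                PySem.List.slice raw_entries (some (p.1 + 1)) none
  if others.any (fun o => pvKeyB o == k) then PySem.Set.add dup p.2.1 else dup

def find_duplicates_block_aware_py_alt (sequence_entries : List (String × String)) (raw_entries : List (String × String × Int)) : (List (String × String)) × List Int :=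
  let duplicate_names : PySem.Set String :=
    (PySem.List.enumerate raw_entries 0).foldl (pvStepB raw_entries) PySem.Set.empty
  -- dict(sequence_entries)
  let unique_sequences : PySem.Dict String String :=
    sequence_entries.foldl (fun d q => d.insert q.1 q.2) PySem.Dict.empty
  -- [i for i, (name, _) in enumerate(sequence_entries) if name in duplicate_names]
  let duplicate_indices : List Int :=
    ((PySem.List.enumerate sequence_entries 0).filter
      (fun p => PySem.Set.contains duplicate_names p.2.1)).map (fun p => p.1)
  (unique_sequences.items, duplicate_indices)

-- ===== PRECONDITION & SPEC =====
def Spec_find_duplicates_block_aware_py (sequence_entries : List (String × String)) (raw_entries : List (String × String × Int)) (out : (List (String × String)) × List Int) : Prop := out = find_duplicates_block_aware_py_alt sequence_entries raw_entries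
instance (sequence_entries : List (String × String)) (raw_entries : List (String × String × Int)) (out : (List (String × String)) × List Int) : Decidable (Spec_find_duplicates_block_aware_py sequence_entries raw_entries out) := by unfold Spec_find_duplicates_block_aware_py; infer_instance

-- ===== CLAIM (what is proved, stated in full; the proofs are below) =====
def Claim_equal_find_duplicates_block_aware_py : Prop := ∀ (sequence_entries : List (String × String)) (raw_entries : List (String × String × Int)), Dom_find_duplicates_block_aware_py sequence_entries raw_entries → Spec_find_duplicates_block_aware_py sequence_entries raw_entries (find_duplicates_block_aware_py sequence_entries raw_entries)

-- ===== LEMMAS AND PROOFS =====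
-- Characterisation of PySem.Chars.splitOnMax.go on separator "/" with maxsplit 1
lemma go_zero : ∀ (fuel : Nat) (l cur : List Char) (acc : List (List Char)),
    PySem.Chars.splitOnMax.go ['/'] fuel 0 l cur acc = ((cur.reverse ++ l) :: acc).reverse := by
  intro fuel l cur acc
  cases fuel with
  | zero => simp [PySem.Chars.splitOnMax.go]
  | succ f => cases l with
    | nil => simp [PySem.Chars.splitOnMax.go]
    | cons c rest => simp [PySem.Chars.splitOnMax.go]

lemma go_one : ∀ (fuel : Nat) (l cur : List Char) (acc : List (List Char)), l.length ≤ fuel →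
    PySem.Chars.splitOnMax.go ['/'] fuel 1 l cur acc =
      if '/' ∈ l then acc.reverse ++ [cur.reverse ++ l.takeWhile (· ≠ '/'), (l.dropWhile (· ≠ '/')).tail]
      else acc.reverse ++ [cur.reverse ++ l] := by
  intro fuel
  induction fuel with
  | zero =>
    intro l cur acc h
    have : l = [] := List.length_eq_zero_iff.mp (Nat.le_zero.mp h)
    subst this; simp [PySem.Chars.splitOnMax.go]
  | succ f ih =>
    intro l cur acc h
    cases l with
    | nil => simp [PySem.Chars.splitOnMax.go]
    | cons c rest =>
      by_cases hc : c = '/'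
      · subst hc
        simp only [PySem.Chars.splitOnMax.go, if_neg (one_ne_zero)]
        rw [if_pos (by simp [List.isPrefixOf])]
        rw [go_zero]
        simp
      · have hpre : List.isPrefixOf ['/'] (c :: rest) = false := by
          simp [List.isPrefixOf]; exact fun h' => absurd h'.symm hc
        simp only [PySem.Chars.splitOnMax.go, if_neg (one_ne_zero), hpre]
        simp only [Bool.false_eq_true, if_false]
        rw [ih rest (c :: cur) acc (by simpa using Nat.le_of_succ_le_succ h)]
        simp [hc, Ne.symm hc]

lemma isIn_slash (n : String) : PySem.Str.isIn "/" n = true ↔ '/' ∈ n.toList := by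
  rw [PySem.Str.isIn_iff_infix]
  exact List.singleton_infix_iff '/' n.toList

lemma parse_pos (n : String) (h : '/' ∈ n.toList) :
    parse_sequence_identifier_port n =
      (String.ofList (n.toList.takeWhile (· ≠ '/')),
       some (String.ofList ((n.toList.dropWhile (· ≠ '/')).tail))) := by
  unfold parse_sequence_identifier_port
  rw [if_pos ((isIn_slash n).mpr h)]
  simp only [PySem.Str.splitMax?, PySem.Chars.splitMax?, PySem.Chars.splitOnMax]
  rw [if_neg (by decide), if_neg (by decide)]
  simp only [show ("/".toList) = ['/'] from rfl, show Int.toNat 1 = 1 from rfl, Option.map_some, Option.getD_some]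
  rw [go_one (n.toList.length + 1) n.toList [] [] (by omega)]
  rw [if_pos (by simpa using h)]
  simp [PySem.List.pyGet?, PySem.List.pyIdx?]

lemma parse_neg (n : String) (h : '/' ∉ n.toList) :
    parse_sequence_identifier_port n = (n, none) := by
  unfold parse_sequence_identifier_port
  rw [if_neg (by rw [isIn_slash]; simpa using h)]

lemma parse_recover (n : String) :
    n.toList = (parse_sequence_identifier_port n).1.toList ++
      (match (parse_sequence_identifier_port n).2 with
       | none => []
       | some c => '/' :: c.toList) := by
  by_cases h : '/' ∈ n.toList
  · rw [parse_pos n h]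
    simp only [String.toList_ofList]
    have hne : n.toList.dropWhile (· ≠ '/') ≠ [] := by
      simp only [ne_eq, List.dropWhile_eq_nil_iff]
      push Not
      exact ⟨'/', h, by simp⟩
    have hhd : (n.toList.dropWhile (· ≠ '/')).head hne = '/' := by
      have := List.head_dropWhile_not (p := (· ≠ '/')) (l := n.toList) hne
      simpa using this
    conv_lhs => rw [← List.takeWhile_append_dropWhile (p := (· ≠ '/')) (l := n.toList)]
    rw [← List.cons_head_tail hne, hhd]
    simp
  · rw [parse_neg n h]; simp

lemma parse_inj {n1 n2 : String}
    (h : parse_sequence_identifier_port n1 = parse_sequence_identifier_port n2) : n1 = n2 := by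
  apply String.toList_inj.mp
  rw [parse_recover n1, parse_recover n2, h]

-- combined key as seen by A's nested dict (block outermost)
def pvKeyA (e : String × String × Int) : Int × (String × Option String) × String :=
  (e.2.2, parse_sequence_identifier_port e.1, e.2.1)

-- nested per-block count actually stored by A's first pass
def pvNget (per : PySem.Dict Int (PySem.Dict (String × Option String × String) Int))
    (k : Int × (String × Option String) × String) : Int :=
  (per.getD k.1 PySem.Dict.empty).getD (k.2.1.1, k.2.1.2, k.2.2) 0

def pvCnt (l : List (String × String × Int)) (k : Int × (String × Option String) × String) : Nat :=
  l.countP (fun x => decide (pvKeyA x = k))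

lemma pvKeyA_name {e e' : String × String × Int} (h : pvKeyA e = pvKeyA e') : e.1 = e'.1 :=
  parse_inj (congrArg (fun k => k.2.1) h)

lemma stepA_fst (st : PySem.Dict Int (PySem.Dict (String × Option String × String) Int) × PySem.Set String)
    (e : String × String × Int) (k : Int × (String × Option String) × String) :
    pvNget (pvStepA st e).1 k = if k = pvKeyA e then pvNget st.1 k + 1 else pvNget st.1 k := by
  rcases k with ⟨kb, ⟨ka, kc⟩, kd⟩
  simp only [pvStepA, pvNget, pvKeyA, PySem.Dict.getD_insert, Prod.mk.injEq]
  split_ifs <;> simp_all [PySem.Dict.getD_insert, Prod.ext_iff]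

lemma stepA_snd (st : PySem.Dict Int (PySem.Dict (String × Option String × String) Int) × PySem.Set String)
    (e : String × String × Int) :
    (pvStepA st e).2 = if 1 < pvNget st.1 (pvKeyA e) + 1 then PySem.Set.add st.2 e.1 else st.2 := rfl

lemma A_fold_mem : ∀ (l : List (String × String × Int))
    (per : PySem.Dict Int (PySem.Dict (String × Option String × String) Int))
    (dup : PySem.Set String) (c0 : (Int × (String × Option String) × String) → Int),
    (∀ k, pvNget per k = c0 k) → (∀ k, 0 ≤ c0 k) → ∀ n : String,
    (n ∈ (l.foldl pvStepA (per, dup)).2 ↔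
      n ∈ dup ∨ ∃ e ∈ l, e.1 = n ∧ 2 ≤ c0 (pvKeyA e) + (pvCnt l (pvKeyA e) : Int)) := by
  intro l
  induction l with
  | nil => intro per dup c0 hper hc0 n; simp
  | cons e t ih =>
    intro per dup c0 hper hc0 n
    rw [List.foldl_cons]
    have h1 : ∀ k, pvNget (pvStepA (per, dup) e).1 k =
        (fun k => if k = pvKeyA e then c0 k + 1 else c0 k) k := by
      intro k; rw [stepA_fst]; simp only [hper]
    have h2 : ∀ k, 0 ≤ (fun k => if k = pvKeyA e then c0 k + 1 else c0 k) k := by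
      intro k; by_cases hk : k = pvKeyA e <;> simp [hk] <;> [skip; exact hc0 k]
      have := hc0 (pvKeyA e); omega
    have hdup : (pvStepA (per, dup) e).2 =
        if 1 < c0 (pvKeyA e) + 1 then PySem.Set.add dup e.1 else dup := by
      rw [stepA_snd]; simp only [hper]
    have hmain := ih (pvStepA (per, dup) e).1 (pvStepA (per, dup) e).2 _ h1 h2 n
    rw [Prod.mk.eta] at hmain  -- foldl over (st'.1, st'.2)
    rw [hmain, hdup]
    have hcnt_cons_self : pvCnt (e :: t) (pvKeyA e) = pvCnt t (pvKeyA e) + 1 := by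
      simp [pvCnt]
    have hcnt_cons_ne : ∀ k, k ≠ pvKeyA e → pvCnt (e :: t) k = pvCnt t k := by
      intro k hk
      simp only [pvCnt, List.countP_cons]
      rw [if_neg (by simpa using fun h : pvKeyA e = k => hk h.symm)]
      omega
    constructor
    · rintro (hd | ⟨e', he', hn, hcnt⟩)
      · split_ifs at hd with hgt
        · rw [PySem.Set.mem_add] at hd
          rcases hd with hd | hd
          · exact Or.inl hd
          · refine Or.inr ⟨e, List.mem_cons_self, hd.symm, ?_⟩
            rw [hcnt_cons_self]; push_cast; omega
        · exact Or.inl hd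
      · refine Or.inr ⟨e', List.mem_cons_of_mem _ he', hn, ?_⟩
        by_cases hke : pvKeyA e' = pvKeyA e
        · rw [hke] at hcnt ⊢
          rw [if_pos rfl] at hcnt
          rw [hcnt_cons_self]; push_cast at hcnt ⊢; omega
        · rw [if_neg hke] at hcnt
          rw [hcnt_cons_ne _ hke]; exact hcnt
    · rintro (hd | ⟨e', he', hn, hcnt⟩)
      · refine Or.inl ?_
        split_ifs with hgt
        · rw [PySem.Set.mem_add]; exact Or.inl hd
        · exact hd
      · rcases List.mem_cons.mp he' with rfl | he't
        · by_cases hge : 1 ≤ c0 (pvKeyA e')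
          · refine Or.inl ?_
            rw [if_pos (by omega), PySem.Set.mem_add]
            exact Or.inr hn.symm
          · have hc00 : c0 (pvKeyA e') = 0 := le_antisymm (by omega) (hc0 _)
            rw [hcnt_cons_self, hc00] at hcnt
            have hpos : 0 < pvCnt t (pvKeyA e') := by push_cast at hcnt; omega
            obtain ⟨x, hx, hpx⟩ := List.countP_pos_iff.mp (show 0 < List.countP (fun x => decide (pvKeyA x = pvKeyA e')) t from hpos)
            have hkx : pvKeyA x = pvKeyA e' := of_decide_eq_true hpx
            refine Or.inr ⟨x, hx, ?_, ?_⟩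
            · rw [pvKeyA_name hkx]; exact hn
            · rw [hkx, if_pos rfl, hc00]
              have : 0 < pvCnt t (pvKeyA e') := hpos
              push_cast; omega
        · refine Or.inr ⟨e', he't, hn, ?_⟩
          by_cases hke : pvKeyA e' = pvKeyA e
          · rw [hke] at hcnt ⊢
            rw [hcnt_cons_self] at hcnt
            rw [if_pos rfl]; push_cast at hcnt ⊢; omega
          · rw [hcnt_cons_ne _ hke] at hcnt
            rw [if_neg hke]; exact hcnt

lemma A_mem (raw : List (String × String × Int)) (n : String) :
    n ∈ (raw.foldl pvStepA (PySem.Dict.empty, PySem.Set.empty)).2 ↔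
      ∃ e ∈ raw, e.1 = n ∧ 2 ≤ (pvCnt raw (pvKeyA e) : Int) := by
  rw [A_fold_mem raw PySem.Dict.empty PySem.Set.empty (fun _ => 0)
    (by intro k; simp [pvNget]) (by intro k; norm_num) n]
  simp [PySem.Set.empty]

-- A's key and B's key carry the same data (reordered tuples), so the counts agree
lemma keyA_eq_iff (x e : String × String × Int) : pvKeyA x = pvKeyA e ↔ pvKeyB x = pvKeyB e := by
  simp only [pvKeyA, pvKeyB, Prod.ext_iff]
  tauto

lemma cnt_eq (l : List (String × String × Int)) (e : String × String × Int) :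
    pvCnt l (pvKeyA e) = l.countP (fun x => decide (pvKeyB x = pvKeyB e)) := by
  unfold pvCnt
  apply List.countP_congr
  intro x _
  simp [keyA_eq_iff]

-- one step of B's loop, at index pre.length of raw = pre ++ e :: t
lemma stepB_at (pre t : List (String × String × Int)) (e : String × String × Int)
    (dup : PySem.Set String) :
    pvStepB (pre ++ e :: t) dup ((pre.length : Int), e) =
      if 2 ≤ (pvCnt (pre ++ e :: t) (pvKeyA e) : Int) then PySem.Set.add dup e.1 else dup := by
  have hto : PySem.List.slice (pre ++ e :: t) none (some (pre.length : Int)) = pre := by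
    rw [PySem.List.slice_to_natCast]
    simp
  have hfrom : PySem.List.slice (pre ++ e :: t) (some ((pre.length : Int) + 1)) none = t := by
    have h1 : ((pre.length : Int) + 1) = ((pre.length + 1 : Nat) : Int) := by push_cast; ring
    rw [h1, PySem.List.slice_from_natCast]
    rw [← List.drop_drop, List.drop_left]
    simp
  have hcap : pvCnt (pre ++ e :: t) (pvKeyA e) =
      (pre ++ t).countP (fun x => decide (pvKeyB x = pvKeyB e)) + 1 := by
    rw [cnt_eq]
    simp [List.countP_append]
    omega
  have hany : (((pre ++ t).any (fun o => pvKeyB o == pvKeyB e)) = true) ↔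
      2 ≤ (pvCnt (pre ++ e :: t) (pvKeyA e) : Int) := by
    rw [List.any_eq_true]
    have : (2 ≤ (pvCnt (pre ++ e :: t) (pvKeyA e) : Int)) ↔
        0 < (pre ++ t).countP (fun x => decide (pvKeyB x = pvKeyB e)) := by
      rw [hcap]; push_cast; omega
    rw [this, List.countP_pos_iff]
    simp
  simp only [pvStepB, hto, hfrom]
  by_cases h : ((pre ++ t).any (fun o => pvKeyB o == pvKeyB e)) = true
  · rw [if_pos h, if_pos (hany.mp h)]
  · rw [if_neg h, if_neg (fun hc => h (hany.mpr hc))]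

lemma B_fold_mem : ∀ (t pre : List (String × String × Int)) (dup : PySem.Set String) (n : String),
    (n ∈ (PySem.List.enumerate t (pre.length : Int)).foldl (pvStepB (pre ++ t)) dup ↔
      n ∈ dup ∨ ∃ e ∈ t, e.1 = n ∧ 2 ≤ (pvCnt (pre ++ t) (pvKeyA e) : Int)) := by
  intro t
  induction t with
  | nil => intro pre dup n; simp [PySem.List.enumerate_nil]
  | cons e t' ih =>
    intro pre dup n
    rw [PySem.List.enumerate_cons, List.foldl_cons, stepB_at pre t' e dup]
    have hlen : (pre.length : Int) + 1 = ((pre ++ [e]).length : Int) := by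
      push_cast [List.length_append]
      simp
    have happ : pre ++ e :: t' = (pre ++ [e]) ++ t' := by simp
    rw [hlen]
    conv_lhs => rw [happ]
    rw [ih (pre ++ [e])]
    rw [← happ]
    by_cases hc : 2 ≤ (pvCnt (pre ++ e :: t') (pvKeyA e) : Int)
    · rw [if_pos hc]
      constructor
      · rintro (hd | ⟨e', he', hn, h2⟩)
        · rcases (PySem.Set.mem_add _ _ _).mp hd with hd | hd
          · exact Or.inl hd
          · exact Or.inr ⟨e, List.mem_cons_self, hd.symm, hc⟩
        · exact Or.inr ⟨e', List.mem_cons_of_mem _ he', hn, h2⟩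
      · rintro (hd | ⟨e', he', hn, h2⟩)
        · exact Or.inl ((PySem.Set.mem_add _ _ _).mpr (Or.inl hd))
        · rcases List.mem_cons.mp he' with rfl | he't
          · exact Or.inl ((PySem.Set.mem_add _ _ _).mpr (Or.inr hn.symm))
          · exact Or.inr ⟨e', he't, hn, h2⟩
    · rw [if_neg hc]
      constructor
      · rintro (hd | ⟨e', he', hn, h2⟩)
        · exact Or.inl hd
        · exact Or.inr ⟨e', List.mem_cons_of_mem _ he', hn, h2⟩
      · rintro (hd | ⟨e', he', hn, h2⟩)
        · exact Or.inl hd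
        · rcases List.mem_cons.mp he' with rfl | he't
          · exact absurd h2 hc
          · exact Or.inr ⟨e', he't, hn, h2⟩

lemma B_mem (raw : List (String × String × Int)) (n : String) :
    n ∈ (PySem.List.enumerate raw 0).foldl (pvStepB raw) PySem.Set.empty ↔
      ∃ e ∈ raw, e.1 = n ∧ 2 ≤ (pvCnt raw (pvKeyA e) : Int) := by
  have := B_fold_mem raw [] PySem.Set.empty n
  simp only [List.length_nil, Nat.cast_zero, List.nil_append] at this
  rw [this]
  simp [PySem.Set.empty]

-- the second pass: dict-and-indices fold over enumerate = plain dict fold + filter/map of indices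
lemma out_fold : ∀ (se : List (String × String)) (i : Int) (s : PySem.Set String)
    (d : PySem.Dict String String) (is : List Int),
    (PySem.List.enumerate se i).foldl (pvStepOut s) (d, is) =
      (se.foldl (fun d q => d.insert q.1 q.2) d,
       is ++ ((PySem.List.enumerate se i).filter (fun p => PySem.Set.contains s p.2.1)).map (fun p => p.1)) := by
  intro se
  induction se with
  | nil => intro i s d is; simp [PySem.List.enumerate_nil]
  | cons q t ih =>
    intro i s d is
    rw [PySem.List.enumerate_cons, List.foldl_cons]
    simp only [pvStepOut]
    rw [ih]
    by_cases hq : q.1 ∈ s <;>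
      simp [hq]

-- ===== VERDICT (by name: the statement is the Claim_ definition above) =====
theorem find_duplicates_block_aware_py_spec : Claim_equal_find_duplicates_block_aware_py := by
  intro sequence_entries raw_entries _
  unfold Spec_find_duplicates_block_aware_py
  have hset : ∀ nm : String,
      PySem.Set.contains (raw_entries.foldl pvStepA (PySem.Dict.empty, PySem.Set.empty)).2 nm =
      PySem.Set.contains ((PySem.List.enumerate raw_entries 0).foldl (pvStepB raw_entries) PySem.Set.empty) nm := by
    intro nm
    rw [Bool.eq_iff_iff, PySem.Set.contains_iff, PySem.Set.contains_iff, A_mem, B_mem]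
  have hstep : pvStepOut (raw_entries.foldl pvStepA (PySem.Dict.empty, PySem.Set.empty)).2 =
      pvStepOut ((PySem.List.enumerate raw_entries 0).foldl (pvStepB raw_entries) PySem.Set.empty) := by
    funext acc p
    unfold pvStepOut
    rw [hset]
  simp only [find_duplicates_block_aware_py, find_duplicates_block_aware_py_alt]
  rw [hstep, out_fold]
  simp
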